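-- pv_equiv track=rewrite | github.com/IgordaCosta/More-Python-Tests-Organized | DeleteTypePrograms/RemoveExtraSlashes.py | RemoveExtraSlashes
-- ===== SOURCE A (Python) =====
-- def RemoveExtraSlashes(TextToRemoveSlashes):
--
--     TypeTuppleUsed = False
--     if type(TextToRemoveSlashes) == type(()):
--         TextToRemoveSlashes00 = TextToRemoveSlashes
--         TextToRemoveSlashes = list(TextToRemoveSlashes00)
--         TypeTuppleUsed = True
--
--     TextToRemoveSlashes1 = TextToRemoveSlashes.replace('/','\\')
--     TextToRemoveChars2 = '\\'.join([i for i in TextToRemoveSlashes1.split('\\') if i !=''])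
--
--     if TypeTuppleUsed:
--         TextToRemoveChars200 = TextToRemoveChars2
--         TextToRemoveChars2 = tuple(TextToRemoveChars200)
--
--     return TextToRemoveChars2
-- ===== SOURCE B (Python) =====
-- def RemoveExtraSlashes(TextToRemoveSlashes):
--     out = []
--     pending = False
--     for c in TextToRemoveSlashes:
--         if c == '/' or c == '\\':
--             pending = True
--         else:
--             if pending and out:
--                 out.append('\\')
--             out.append(c)
--             pending = False
--     return ''.join(out)
-- ===== Notes on version B (the rewrite author's own statement) =====
-- stated objective: alternative
-- what changed: Replaces A's replace-then-split-filter-join pipeline (which builds an intermediate normalized string and a list of pieces) by a single character-by-character scan with a pending-separator flag that emits at most one backslash between runs of non-separator characters.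
import Mathlib
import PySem

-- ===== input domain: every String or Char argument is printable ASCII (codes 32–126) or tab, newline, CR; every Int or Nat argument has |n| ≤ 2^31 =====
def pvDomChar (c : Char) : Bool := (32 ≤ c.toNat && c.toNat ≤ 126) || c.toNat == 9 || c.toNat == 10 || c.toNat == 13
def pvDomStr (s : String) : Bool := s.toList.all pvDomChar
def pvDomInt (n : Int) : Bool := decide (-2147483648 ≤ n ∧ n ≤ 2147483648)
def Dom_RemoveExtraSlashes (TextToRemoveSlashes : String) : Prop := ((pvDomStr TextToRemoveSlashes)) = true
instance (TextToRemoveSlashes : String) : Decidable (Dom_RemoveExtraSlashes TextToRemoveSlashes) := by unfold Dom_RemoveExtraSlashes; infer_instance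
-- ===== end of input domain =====

-- B replaces A's replace/split/filter/join pipeline by a single scan with a pending-separator flag
-- (objective: alternative decomposition, same O(n) cost). String inputs only (the tuple branch of A
-- is outside the String type of this port and raises AttributeError in Python anyway).

-- ===== PORT A =====
-- A: normalize '/'→'\', split on '\', drop empty pieces, re-join with single '\'.
def RemoveExtraSlashes (TextToRemoveSlashes : String) : String :=
  let TextToRemoveSlashes1 := PySem.Str.replace TextToRemoveSlashes "/" "\\"
  match PySem.Str.split? TextToRemoveSlashes1 "\\" with
  | some pieces => PySem.Str.join "\\" (pieces.filter (fun i => i ≠ ""))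
  | none => ""   -- unreachable: the separator "\\" is nonempty, split? never returns none

-- ===== PORT B =====
-- loop body of B's scan: separators only set the pending flag; a non-separator char flushes
-- one '\' (if a separator is pending and output is nonempty) and then itself.
def pvStepB (st : List Char × Bool) (c : Char) : List Char × Bool :=
  if c = '/' ∨ c = '\\' then (st.1, true)
  else (if st.2 ∧ st.1 ≠ [] then st.1 ++ ['\\', c] else st.1 ++ [c], false)

def RemoveExtraSlashes_alt (TextToRemoveSlashes : String) : String :=
  String.ofList (TextToRemoveSlashes.toList.foldl pvStepB ([], false)).1

-- ===== PRECONDITION & SPEC =====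
def Spec_RemoveExtraSlashes (TextToRemoveSlashes : String) (out : String) : Prop := out = RemoveExtraSlashes_alt TextToRemoveSlashes
instance (TextToRemoveSlashes : String) (out : String) : Decidable (Spec_RemoveExtraSlashes TextToRemoveSlashes out) := by unfold Spec_RemoveExtraSlashes; infer_instance

-- ===== CLAIM (what is proved, stated in full; the proofs are below) =====
def Claim_equal_RemoveExtraSlashes : Prop := ∀ (TextToRemoveSlashes : String), Dom_RemoveExtraSlashes TextToRemoveSlashes → Spec_RemoveExtraSlashes TextToRemoveSlashes (RemoveExtraSlashes TextToRemoveSlashes)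

-- ===== LEMMAS AND PROOFS =====

-- the per-character effect of A's replace('/','\\')
def pvSub (c : Char) : Char := if c = '/' then '\\' else c
-- separator test on the ORIGINAL characters
def pvIsSep (c : Char) : Bool := c = '/' || c = '\\'
def pvHeadSep : List Char → Bool
  | [] => false
  | c :: _ => pvIsSep c

-- abstract form of Chars.splitOn.go for the single-character separator '\'
def pvSplitAux : List Char → List Char → List (List Char)
  | [], cur => [cur.reverse]
  | c :: t, cur => if c = '\\' then cur.reverse :: pvSplitAux t [] else pvSplitAux t (c :: cur)

-- join-after-filter and its "tail" form
def pvF (ps : List (List Char)) : List Char := PySem.Chars.join ['\\'] (ps.filter (· ≠ []))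
def pvG (ps : List (List Char)) : List Char := (ps.filter (· ≠ [])).flatMap (fun q => '\\' :: q)

-- the common canonical result, recursively on the original characters
def pvCanon : List Char → List Char
  | [] => []
  | c :: t => if pvIsSep c then pvCanon t
      else c :: (if pvCanon t ≠ [] ∧ pvHeadSep t then '\\' :: pvCanon t else pvCanon t)

theorem pv_rep_go (fuel : Nat) (l acc : List Char) (h : l.length ≤ fuel) :
    PySem.Chars.replace.go ['/'] ['\\'] fuel l acc = acc.reverse ++ l.map pvSub := by
  induction fuel generalizing l acc with
  | zero =>
    interval_cases hl : l.length
    · rw [List.length_eq_zero_iff] at hl; subst hl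
      simp [PySem.Chars.replace.go]
  | succ n ih =>
    cases l with
    | nil => simp [PySem.Chars.replace.go]
    | cons c t =>
      rw [PySem.Chars.replace.go]
      by_cases hc : c = '/'
      · subst hc
        have hp : List.isPrefixOf ['/'] ('/' :: t) = true := by simp [List.isPrefixOf]
        simp only [hp, reduceIte, List.drop_one]
        rw [ih _ _ (by simpa using Nat.le_of_succ_le_succ h)]
        simp [pvSub]
      · have hp : List.isPrefixOf ['/'] (c :: t) = false := by
          have hne : ¬('/' = c) := fun h => hc h.symm
          simp [List.isPrefixOf, hne]
        simp only [hp]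
        rw [if_neg (by simp [hc])]
        rw [ih _ _ (by simpa using Nat.le_of_succ_le_succ h)]
        simp [pvSub, hc]

theorem pv_rep (ds : List Char) :
    PySem.Chars.replace ds ['/'] ['\\'] = ds.map pvSub := by
  rw [PySem.Chars.replace]
  rw [if_neg (by simp)]
  simpa using pv_rep_go ds.length ds [] (le_refl _)

theorem pv_split_go (fuel : Nat) (l cur : List Char) (acc : List (List Char))
    (h : l.length < fuel) :
    PySem.Chars.splitOn.go ['\\'] fuel l cur acc = acc.reverse ++ pvSplitAux l cur := by
  induction fuel generalizing l cur acc with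
  | zero => omega
  | succ n ih =>
    cases l with
    | nil => simp [PySem.Chars.splitOn.go, pvSplitAux]
    | cons c t =>
      rw [PySem.Chars.splitOn.go]
      by_cases hc : c = '\\'
      · subst hc
        have hp : List.isPrefixOf ['\\'] ('\\' :: t) = true := by simp [List.isPrefixOf]
        simp only [hp, reduceIte, List.drop_one]
        rw [ih _ _ _ (by simpa using Nat.lt_of_succ_lt_succ h)]
        simp [pvSplitAux]
      · have hp : List.isPrefixOf ['\\'] (c :: t) = false := by
          have hne : ¬('\\' = c) := fun h => hc h.symm
          simp [List.isPrefixOf, hne]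
        simp only [hp]
        rw [if_neg (by simp [hc])]
        rw [ih _ _ _ (by simpa using Nat.lt_of_succ_lt_succ h)]
        simp [pvSplitAux, hc]

theorem pv_splitOn (ds : List Char) :
    PySem.Chars.splitOn ds ['\\'] = pvSplitAux ds [] := by
  rw [PySem.Chars.splitOn]
  simpa using pv_split_go (ds.length + 1) ds [] [] (by omega)

theorem pv_splitAux_ne_nil (t cur : List Char) : pvSplitAux t cur ≠ [] := by
  induction t generalizing cur with
  | nil => simp [pvSplitAux]
  | cons c r ih =>
    by_cases hc : c = '\\' <;> simp [pvSplitAux, hc, ih]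

theorem pv_splitAux_cur (t : List Char) : ∀ cur,
    pvSplitAux t cur = (cur.reverse ++ (pvSplitAux t []).headI) :: (pvSplitAux t []).tail := by
  induction t with
  | nil => intro cur; simp [pvSplitAux]
  | cons c r ih =>
    intro cur
    by_cases hc : c = '\\'
    · simp [pvSplitAux, hc]
    · simp only [pvSplitAux, if_neg hc]
      rw [ih (c :: cur), ih [c]]
      simp

theorem pv_JG (q : List Char) (qs : List (List Char)) :
    PySem.Chars.join ['\\'] (q :: qs) = q ++ qs.flatMap (fun p => '\\' :: p) := by
  induction qs generalizing q with
  | nil => simp [PySem.Chars.join_singleton]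
  | cons b l ih =>
    rw [PySem.Chars.join_cons_cons, ih]
    simp

theorem pv_G_eq (ps : List (List Char)) :
    pvG ps = if pvF ps = [] then [] else '\\' :: pvF ps := by
  unfold pvG pvF
  cases hf : ps.filter (· ≠ []) with
  | nil => simp [PySem.Chars.join_nil]
  | cons q qs =>
    have hq : q ≠ [] := by
      have : q ∈ ps.filter (· ≠ []) := by rw [hf]; exact List.mem_cons_self
      simpa using (List.of_mem_filter this)
    rw [pv_JG]
    have : q ++ qs.flatMap (fun p => '\\' :: p) ≠ [] := by
      cases q with
      | nil => exact absurd rfl hq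
      | cons a b => simp
    simp [this]

-- pvF through a cons
theorem pvF_nil_cons (ps : List (List Char)) : pvF ([] :: ps) = pvF ps := by
  simp [pvF]

theorem pvF_cons (p : List Char) (ps : List (List Char)) (hp : p ≠ []) :
    pvF (p :: ps) = p ++ pvG ps := by
  unfold pvF pvG
  simp only [List.filter_cons, decide_eq_true_eq]
  rw [if_pos hp]
  exact pv_JG _ _

theorem pv_split_dest (m : List Char) :
    ∃ H T, pvSplitAux m [] = H :: T := by
  cases h : pvSplitAux m [] with
  | nil => exact absurd h (pv_splitAux_ne_nil _ _)
  | cons a b => exact ⟨a, b, rfl⟩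

-- filtered-join of the split of the normalized string = pvCanon of the original
theorem pv_canon_eq (cs : List Char) :
    pvF (pvSplitAux (cs.map pvSub) []) = pvCanon cs := by
  induction cs with
  | nil => simp [pvSplitAux, pvF, pvCanon, PySem.Chars.join_nil]
  | cons c r ih =>
    by_cases hs : pvIsSep c = true
    · have hsub : pvSub c = '\\' := by
        rcases (by simpa [pvIsSep] using hs : c = '/' ∨ c = '\\') with h | h <;>
          simp [pvSub, h]
      simp only [List.map_cons, hsub, pvSplitAux, reduceIte, List.reverse_nil]
      rw [pvF_nil_cons, ih]
      simp [pvCanon, hs]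
    · have hc2 : ¬ (c = '/' ∨ c = '\\') := by simpa [pvIsSep] using hs
      have hsub : pvSub c = c := by unfold pvSub; rw [if_neg (fun h => hc2 (Or.inl h))]
      have hcb : c ≠ '\\' := fun h => hc2 (Or.inr h)
      simp only [List.map_cons, hsub, pvSplitAux, if_neg hcb]
      obtain ⟨H, T, hHT⟩ := pv_split_dest (r.map pvSub)
      have hcur := pv_splitAux_cur (r.map pvSub) [c]
      rw [hHT] at hcur ih
      simp only [List.headI, List.tail, List.reverse_cons, List.reverse_nil,
        List.nil_append, List.append_nil] at hcur
      rw [hcur, pvF_cons _ _ (by simp)]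
      cases r with
      | nil =>
        have : H = [] ∧ T = [] := by
          have : pvSplitAux ([] : List Char) [] = [[]] := by simp [pvSplitAux]
          simp only [List.map_nil] at hHT
          rw [this] at hHT
          exact ⟨(List.cons.injEq _ _ _ _ ▸ hHT).1.symm, (List.cons.injEq _ _ _ _ ▸ hHT).2.symm⟩
        rcases this with ⟨h1, h2⟩
        subst h1; subst h2
        simp [pvG, pvCanon, hs, pvHeadSep]
      | cons c' r' =>
        by_cases hs' : pvIsSep c' = true
        · have hsub' : pvSub c' = '\\' := by
            rcases (by simpa [pvIsSep] using hs' : c' = '/' ∨ c' = '\\') with h | h <;>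
              simp [pvSub, h]
          have hHT' : H = [] ∧ T = pvSplitAux (r'.map pvSub) [] := by
            simp only [List.map_cons, hsub', pvSplitAux, reduceIte, List.reverse_nil] at hHT
            exact ⟨(List.cons.injEq _ _ _ _ ▸ hHT).1.symm, (List.cons.injEq _ _ _ _ ▸ hHT).2.symm⟩
          rcases hHT' with ⟨h1, h2⟩
          subst h1
          rw [pvF_nil_cons] at ih
          have hcr : pvCanon (c' :: r') = pvF T := by
            rw [← ih]
          have hhead : pvHeadSep (c' :: r') = true := by simp [pvHeadSep, hs']
          have hcanon : pvCanon (c :: c' :: r')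
              = c :: (if pvCanon (c' :: r') ≠ [] ∧ pvHeadSep (c' :: r') = true
                      then '\\' :: pvCanon (c' :: r') else pvCanon (c' :: r')) := by
            conv_lhs => rw [pvCanon]
            rw [if_neg (by simp [hs])]
          rw [hcanon, hcr, hhead, pv_G_eq]
          by_cases hz : pvF T = [] <;> simp [hz]
        · have hc2' : ¬ (c' = '/' ∨ c' = '\\') := by simpa [pvIsSep] using hs'
          have hsub' : pvSub c' = c' := by unfold pvSub; rw [if_neg (fun h => hc2' (Or.inl h))]
          have hcb' : c' ≠ '\\' := fun h => hc2' (Or.inr h)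
          obtain ⟨H', T', hHT2⟩ := pv_split_dest (r'.map pvSub)
          have hcur' := pv_splitAux_cur (r'.map pvSub) [c']
          rw [hHT2] at hcur'
          simp only [List.headI, List.tail, List.reverse_cons, List.reverse_nil,
            List.nil_append, List.append_nil] at hcur'
          have hHT' : H = c' :: H' ∧ T = T' := by
            simp only [List.map_cons, hsub', pvSplitAux, if_neg hcb'] at hHT
            rw [hcur'] at hHT
            exact ⟨(List.cons.injEq _ _ _ _ ▸ hHT).1.symm, (List.cons.injEq _ _ _ _ ▸ hHT).2.symm⟩
          rcases hHT' with ⟨h1, h2⟩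
          subst h1; subst h2
          rw [pvF_cons _ _ (by simp)] at ih
          have hhead : pvHeadSep (c' :: r') = false := by simp [pvHeadSep, hs']
          have hcanon : pvCanon (c :: c' :: r')
              = c :: (if pvCanon (c' :: r') ≠ [] ∧ pvHeadSep (c' :: r') = true
                      then '\\' :: pvCanon (c' :: r') else pvCanon (c' :: r')) := by
            conv_lhs => rw [pvCanon]
            rw [if_neg (by simp [hs])]
          rw [hcanon, hhead, ← ih]
          simp

-- invariant of B's scan
theorem pv_scan (cs : List Char) : ∀ (out : List Char) (p : Bool),
    (cs.foldl pvStepB (out, p)).1 =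
      out ++ (if out ≠ [] ∧ pvCanon cs ≠ [] ∧ (p = true ∨ pvHeadSep cs = true)
              then '\\' :: pvCanon cs else pvCanon cs) := by
  induction cs with
  | nil => intro out p; simp [pvCanon]
  | cons c t ih =>
    intro out p
    by_cases hs : pvIsSep c = true
    · have hc2 : c = '/' ∨ c = '\\' := by simpa [pvIsSep] using hs
      simp only [List.foldl_cons, pvStepB, if_pos hc2]
      rw [ih out true]
      simp only [pvCanon, hs, pvHeadSep]
      by_cases ho : out = [] <;> by_cases hz : pvCanon t = [] <;>
        simp [ho, hz]
    · have hc2 : ¬ (c = '/' ∨ c = '\\') := by simpa [pvIsSep] using hs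
      simp only [List.foldl_cons, pvStepB, if_neg hc2]
      have hcanon : pvCanon (c :: t)
          = c :: (if pvCanon t ≠ [] ∧ pvHeadSep t then '\\' :: pvCanon t else pvCanon t) := by
        simp [pvCanon, hs]
      by_cases hp : p = true ∧ out ≠ []
      · rw [if_pos hp, ih (out ++ ['\\', c]) false]
        rw [hcanon]
        simp only [pvHeadSep, hs]
        by_cases hz : pvCanon t = [] <;> by_cases hh : pvHeadSep t = true <;>
          simp [hz, hp.1, hp.2]
      · have hp2 : ¬(out ≠ [] ∧ p = true) := fun h => hp ⟨h.2, h.1⟩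
        rw [if_neg hp, ih (out ++ [c]) false]
        rw [hcanon]
        simp only [pvHeadSep, hs]
        by_cases hz : pvCanon t = [] <;> by_cases hh : pvHeadSep t = true <;>
          by_cases ho : out = [] <;> by_cases hpp : p = true <;>
          simp_all

theorem pv_alt_eq (s : String) :
    RemoveExtraSlashes_alt s = String.ofList (pvCanon s.toList) := by
  unfold RemoveExtraSlashes_alt
  rw [pv_scan s.toList [] false]
  simp

theorem pv_A_eq (s : String) :
    RemoveExtraSlashes s = String.ofList (pvCanon s.toList) := by
  have hbody : RemoveExtraSlashes s = (match PySem.Str.split? (PySem.Str.replace s "/" "\\") "\\" with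
    | some pieces => PySem.Str.join "\\" (pieces.filter (fun i => i ≠ ""))
    | none => "") := rfl
  rw [hbody]
  have h1 : (PySem.Str.replace s "/" "\\").toList = s.toList.map pvSub := by
    rw [PySem.Str.toList_replace]
    have : ("/" : String).toList = ['/'] := rfl
    have h2 : ("\\" : String).toList = ['\\'] := rfl
    rw [this, h2, pv_rep]
  have hsplit := PySem.Str.split?_map (PySem.Str.replace s "/" "\\") "\\"
  rw [PySem.Chars.split?] at hsplit
  rw [if_neg (by simp)] at hsplit
  cases hsp : PySem.Str.split? (PySem.Str.replace s "/" "\\") "\\" with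
  | none => rw [hsp] at hsplit; simp at hsplit
  | some pieces =>
    rw [hsp] at hsplit
    simp only [Option.map_some, Option.some.injEq] at hsplit
    show PySem.Str.join "\\" (pieces.filter (fun i => i ≠ "")) = String.ofList (pvCanon s.toList)
    apply String.toList_inj.mp
    rw [PySem.Str.toList_join]
    have hmapfilter : (pieces.filter (fun i => i ≠ "")).map String.toList
        = (pieces.map String.toList).filter (· ≠ []) := by
      rw [List.filter_map]
      congr 1
      refine List.filter_congr ?_
      intro i _
      by_cases h : i = ""
      · subst h; simp
      · have : i.toList ≠ [] := by
          intro hl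
          exact h (String.toList_inj.mp (by simp [hl]))
        simp [h, this]
    rw [hmapfilter, hsplit]
    have h3 : ("\\" : String).toList = ['\\'] := rfl
    rw [h3, h1, pv_splitOn]
    have := pv_canon_eq s.toList
    unfold pvF at this
    rw [this]
    simp

-- ===== VERDICT (by name: the statement is the Claim_ definition above) =====
theorem RemoveExtraSlashes_spec : Claim_equal_RemoveExtraSlashes := by
  intro s _
  unfold Spec_RemoveExtraSlashes
  rw [pv_A_eq, pv_alt_eq]
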